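-- pv_equiv track=rewrite | github.com/cryptomathematician/contest | A_Strong_Password.py | max_typing_time_string
-- ===== SOURCE A (Python) =====
-- def max_typing_time_string(s):
--     n = len(s)
--     best_time = 0
--     best_string = ""
--
--     # Try inserting each letter ('a' to 'z') at every position
--     for i in range(n + 1):
--         for c in "abcdefghijklmnopqrstuvwxyz":
--             new_s = s[:i] + c + s[i:]  # Insert letter 'c' at position 'i'
--
--             # Calculate typing time
--             time = 2  # First character takes 2 seconds
--             for j in range(1, len(new_s)):
--                 if new_s[j] == new_s[j - 1]:
--                     time += 1
--                 else:
--                     time += 2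
--
--             # Update best result
--             if time > best_time:
--                 best_time = time
--                 best_string = new_s
--
--     return best_string
-- ===== SOURCE B (Python) =====
-- def max_typing_time_string(s):
--     # Compute the base typing time once; each insertion's time is base plus an O(1) local delta.
--     n = len(s)
--     base = 2 + sum(1 if s[j] == s[j - 1] else 2 for j in range(1, n)) if n else 0
--     best_time = 0
--     best_string = ""
--     for i in range(n + 1):
--         for c in "abcdefghijklmnopqrstuvwxyz":
--             if n == 0:
--                 t = 2
--             elif i == 0:
--                 t = base + (1 if c == s[0] else 2)
--             elif i == n:
--                 t = base + (1 if c == s[n - 1] else 2)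
--             else:
--                 t = base - (1 if s[i] == s[i - 1] else 2) \
--                     + (1 if c == s[i - 1] else 2) + (1 if c == s[i] else 2)
--             if t > best_time:
--                 best_time = t
--                 best_string = s[:i] + c + s[i:]
--     return best_string
-- ===== Notes on version B (the rewrite author's own statement) =====
-- stated objective: faster
-- what changed: B computes the typing time of the original string once and evaluates each of the 26*(n+1) candidate insertions by an O(1) local delta (the affected adjacent pairs), instead of rescanning the whole inserted string for every candidate.
import Mathlib
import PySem

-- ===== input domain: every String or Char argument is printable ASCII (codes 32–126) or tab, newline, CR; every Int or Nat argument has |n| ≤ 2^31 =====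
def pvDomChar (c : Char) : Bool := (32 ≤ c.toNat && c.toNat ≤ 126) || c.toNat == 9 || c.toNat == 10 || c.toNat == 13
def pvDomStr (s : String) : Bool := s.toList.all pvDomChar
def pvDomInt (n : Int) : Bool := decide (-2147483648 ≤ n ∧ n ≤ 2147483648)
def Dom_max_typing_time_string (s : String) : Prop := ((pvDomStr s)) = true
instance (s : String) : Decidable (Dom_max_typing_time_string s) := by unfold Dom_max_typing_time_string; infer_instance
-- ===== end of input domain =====

-- B computes the base typing time of s once and scores each of the 26*(n+1) candidate
-- insertions by an O(1) local delta instead of rescanning the whole inserted string.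

-- ===== PORT A =====
-- A's inner scan: time = 2; for j in range(1, len(new_s)): +1 if new_s[j] == new_s[j-1] else +2
def pyTimeA (m : List Char) : Int :=
  (PySem.List.pyRange 1 (m.length : Int) 1).foldl
    (fun t j => if PySem.List.pyGet? m j == PySem.List.pyGet? m (j - 1) then t + 1 else t + 2) 2

def max_typing_time_string (s : String) : String :=
  let l := s.toList
  let n : Int := (l.length : Int)
  let r := (PySem.List.pyRange 0 (n + 1) 1).foldl (fun (st : Int × List Char) i =>
    "abcdefghijklmnopqrstuvwxyz".toList.foldl (fun st c =>
      let new_s := PySem.List.slice l none (some i) ++ c :: PySem.List.slice l (some i) none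
      let t := pyTimeA new_s
      if st.1 < t then (t, new_s) else st) st) ((0 : Int), ([] : List Char))
  String.mk r.2

-- ===== PORT B =====
def max_typing_time_string_alt (s : String) : String :=
  let l := s.toList
  let n : Int := (l.length : Int)
  let base : Int :=
    if l.length ≠ 0 then
      2 + ((PySem.List.pyRange 1 n 1).map (fun j =>
        if PySem.List.pyGet? l j == PySem.List.pyGet? l (j - 1) then (1 : Int) else 2)).sum
    else 0
  let r := (PySem.List.pyRange 0 (n + 1) 1).foldl (fun (st : Int × List Char) i =>
    "abcdefghijklmnopqrstuvwxyz".toList.foldl (fun st c =>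
      let t : Int :=
        if l.length = 0 then 2
        else if i = 0 then base + (if some c == PySem.List.pyGet? l 0 then 1 else 2)
        else if i = n then base + (if some c == PySem.List.pyGet? l (n - 1) then 1 else 2)
        else base - (if PySem.List.pyGet? l i == PySem.List.pyGet? l (i - 1) then 1 else 2)
             + (if some c == PySem.List.pyGet? l (i - 1) then 1 else 2)
             + (if some c == PySem.List.pyGet? l i then 1 else 2)
      if st.1 < t then
        (t, PySem.List.slice l none (some i) ++ c :: PySem.List.slice l (some i) none)
      else st) st) ((0 : Int), ([] : List Char))
  String.mk r.2

-- ===== PRECONDITION & SPEC =====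
def Spec_max_typing_time_string (s : String) (out : String) : Prop := out = max_typing_time_string_alt s
instance (s : String) (out : String) : Decidable (Spec_max_typing_time_string s out) := by unfold Spec_max_typing_time_string; infer_instance

-- ===== CLAIM (what is proved, stated in full; the proofs are below) =====
def Claim_equal_max_typing_time_string : Prop := ∀ (s : String), Dom_max_typing_time_string s → Spec_max_typing_time_string s (max_typing_time_string s)

-- ===== LEMMAS AND PROOFS =====
-- cost of one adjacent pair, and the structural adjacent-pair sum both scans compute
def w (x y : Char) : Int := if x = y then 1 else 2

def pairTime : List Char → Int
  | a :: b :: r => w a b + pairTime (b :: r)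
  | _ => 0

theorem w_comm (x y : Char) : w x y = w y x := by
  unfold w
  by_cases h : x = y
  · rw [if_pos h, if_pos h.symm]
  · rw [if_neg h, if_neg (fun hh => h hh.symm)]

theorem if_w (x y : Char) : (if x = y then (1 : Int) else 2) = w x y := rfl

theorem pairTime_snoc (t : List Char) (a c : Char) :
    pairTime ((a :: t) ++ [c]) = pairTime (a :: t) + w ((a :: t).getLastD 'x') c := by
  induction t generalizing a with
  | nil => simp [pairTime]
  | cons b t ih =>
      simp only [List.cons_append, pairTime] at *
      rw [ih]
      simp [List.getLastD]
      ring

theorem pairTime_mid (k : Nat) (a : Char) (t : List Char) (c : Char) (hk : k < t.length) :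
    pairTime ((a :: t).take (k + 1) ++ c :: (a :: t).drop (k + 1)) =
      pairTime (a :: t) - w ((a :: t).getD k 'x') ((a :: t).getD (k + 1) 'x')
        + w ((a :: t).getD k 'x') c + w c ((a :: t).getD (k + 1) 'x') := by
  induction k generalizing a t with
  | zero =>
      obtain ⟨b, t', rfl⟩ : ∃ b t', t = b :: t' := by
        cases t with | nil => simp at hk | cons b t' => exact ⟨b, t', rfl⟩
      simp [pairTime, List.getD]
      ring
  | succ k ih =>
      obtain ⟨b, t', rfl⟩ : ∃ b t', t = b :: t' := by
        cases t with | nil => simp at hk | cons b t' => exact ⟨b, t', rfl⟩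
      have hk' : k < t'.length := by simpa using hk
      have h := ih b t' hk'
      simp only [List.take, List.drop, List.cons_append, pairTime, List.getD_cons_succ] at *
      rw [h]; ring

theorem sumW (m : List Char) :
    ((PySem.List.pyRange 1 (m.length : Int) 1).map (fun j =>
      if PySem.List.pyGet? m j == PySem.List.pyGet? m (j - 1) then (1 : Int) else 2)).sum
      = pairTime m := by
  induction m using List.reverseRecOn with
  | nil => simp [PySem.List.pyRange_one_eq_nil, pairTime]
  | append_singleton l a ih =>
      cases l with
      | nil => simp [PySem.List.pyRange_one_eq_nil, pairTime]
      | cons b t =>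
        set l := b :: t with hl
        have hn : 1 ≤ (l.length : Int) := by simp [hl]
        have hlen : ((l ++ [a]).length : Int) = (l.length : Int) + 1 := by simp
        rw [hlen, PySem.List.pyRange_one_succ_right hn]
        rw [List.map_append, List.sum_append]
        have hfirst : (PySem.List.pyRange 1 (l.length : Int) 1).map (fun j =>
            if PySem.List.pyGet? (l ++ [a]) j == PySem.List.pyGet? (l ++ [a]) (j - 1) then (1 : Int) else 2)
          = (PySem.List.pyRange 1 (l.length : Int) 1).map (fun j =>
            if PySem.List.pyGet? l j == PySem.List.pyGet? l (j - 1) then (1 : Int) else 2) := by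
          apply List.map_congr_left
          intro j hj
          rw [PySem.List.mem_pyRange_one] at hj
          obtain ⟨u, rfl⟩ : ∃ u : Nat, j = (u : Int) := ⟨j.toNat, by omega⟩
          have h1 : (u : Int) - 1 = ((u - 1 : Nat) : Int) := by omega
          rw [h1]
          simp only [PySem.List.pyGet?_natCast]
          rw [List.getElem?_append_left (by omega), List.getElem?_append_left (by omega)]
        rw [hfirst, ih]
        have hlast : PySem.List.pyGet? (l ++ [a]) (l.length : Int) = some a := by
          simp
        have h1 : ((l.length : Int)) - 1 = ((l.length - 1 : Nat) : Int) := by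
          simp [hl]
        have hprev : PySem.List.pyGet? (l ++ [a]) ((l.length : Int) - 1) = some (l.getLastD 'x') := by
          rw [h1]
          simp only [PySem.List.pyGet?_natCast]
          rw [List.getElem?_append_left (by simp [hl])]
          rw [← List.getLast?_eq_getElem?]
          have hs : (b :: t).getLast?.isSome := by simp
          obtain ⟨x, hx⟩ := Option.isSome_iff_exists.mp hs
          simp [hl, List.getLastD_eq_getLast?, hx]
        rw [pairTime_snoc]
        simp only [List.map_cons, List.map_nil, List.sum_cons, List.sum_nil, hlast, hprev]
        simp only [beq_iff_eq, Option.some.injEq, w, hl]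
        by_cases h : a = (b :: t).getLastD 'x'
        · rw [if_pos h, if_pos h.symm]; ring
        · rw [if_neg h, if_neg (fun hh => h hh.symm)]; ring

theorem pyTimeA_eq (m : List Char) : pyTimeA m = 2 + pairTime m := by
  unfold pyTimeA
  have h := PySem.List.foldl_congr_mem (l := PySem.List.pyRange 1 (m.length : Int) 1)
    (init := (2 : Int))
    (f := fun t j => if PySem.List.pyGet? m j == PySem.List.pyGet? m (j - 1) then t + 1 else t + 2)
    (g := fun t j => t + (if PySem.List.pyGet? m j == PySem.List.pyGet? m (j - 1) then (1 : Int) else 2))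
    (by intro acc x _; dsimp only; split <;> ring)
  rw [h, PySem.List.foldl_add, sumW]

theorem cand (l : List Char) (k : Nat) (hk : k ≤ l.length) (c : Char) :
    2 + pairTime (l.take k ++ c :: l.drop k) =
      if l.length = 0 then 2
      else if (k : Int) = 0 then
        (2 + pairTime l) + (if some c == PySem.List.pyGet? l 0 then (1 : Int) else 2)
      else if (k : Int) = (l.length : Int) then
        (2 + pairTime l) + (if some c == PySem.List.pyGet? l ((l.length : Int) - 1) then (1 : Int) else 2)
      else (2 + pairTime l) - (if PySem.List.pyGet? l (k : Int) == PySem.List.pyGet? l ((k : Int) - 1) then (1 : Int) else 2)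
        + (if some c == PySem.List.pyGet? l ((k : Int) - 1) then (1 : Int) else 2)
        + (if some c == PySem.List.pyGet? l (k : Int) then (1 : Int) else 2) := by
  by_cases h0 : l.length = 0
  · obtain rfl : l = [] := List.length_eq_zero_iff.mp h0
    obtain rfl : k = 0 := Nat.le_zero.mp hk
    simp [pairTime]
  · rw [if_neg h0]
    obtain ⟨a, t, rfl⟩ : ∃ a t', l = a :: t' := by
      cases l with | nil => simp at h0 | cons a t => exact ⟨a, t, rfl⟩
    by_cases hk0 : k = 0
    · subst hk0
      rw [if_pos (by norm_num)]
      have hg : PySem.List.pyGet? (a :: t) 0 = some a := by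
        simp [PySem.List.pyGet?, PySem.List.pyIdx?]
      rw [hg]
      simp only [List.take, List.drop, List.nil_append, pairTime, beq_iff_eq, Option.some.injEq, if_w]
      rw [w_comm c a]
      ring
    · rw [if_neg (by exact_mod_cast hk0)]
      by_cases hkn : k = (a :: t).length
      · subst hkn
        rw [if_pos rfl]
        rw [List.take_length, List.drop_length]
        have h1 : ((a :: t).length : Int) - 1 = (((a :: t).length - 1 : Nat) : Int) := by
          simp
        have hprev : PySem.List.pyGet? (a :: t) (((a :: t).length : Int) - 1) = some ((a :: t).getLastD 'x') := by
          rw [h1, PySem.List.pyGet?_natCast, ← List.getLast?_eq_getElem?]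
          have hs : (a :: t).getLast?.isSome := by simp
          obtain ⟨x, hx⟩ := Option.isSome_iff_exists.mp hs
          simp [List.getLastD_eq_getLast?, hx]
        rw [hprev, pairTime_snoc]
        simp only [beq_iff_eq, Option.some.injEq, if_w]
        rw [w_comm c ((a :: t).getLastD 'x')]
        ring
      · rw [if_neg (by exact_mod_cast hkn)]
        obtain ⟨j, rfl⟩ : ∃ j, k = j + 1 := ⟨k - 1, by omega⟩
        have hj : j < t.length := by simp at hk hkn; omega
        have hga : PySem.List.pyGet? (a :: t) ((j + 1 : Nat) : Int) = some ((a :: t).getD (j + 1) 'x') := by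
          rw [PySem.List.pyGet?_natCast, List.getD_eq_getElem?_getD,
            List.getElem?_eq_getElem (by simp; omega)]
          rfl
        have h1 : (((j + 1 : Nat) : Int)) - 1 = ((j : Nat) : Int) := by push_cast; ring
        have hgb : PySem.List.pyGet? (a :: t) ((((j + 1 : Nat) : Int)) - 1) = some ((a :: t).getD j 'x') := by
          rw [h1, PySem.List.pyGet?_natCast, List.getD_eq_getElem?_getD,
            List.getElem?_eq_getElem (by simp; omega)]
          rfl
        rw [hga, hgb, pairTime_mid j a t c hj]
        simp only [beq_iff_eq, Option.some.injEq, if_w]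
        rw [w_comm ((a :: t).getD (j + 1) 'x') ((a :: t).getD j 'x'),
          w_comm c ((a :: t).getD j 'x')]
        ring

theorem portA_eq_portB (s : String) : max_typing_time_string s = max_typing_time_string_alt s := by
  unfold max_typing_time_string max_typing_time_string_alt
  dsimp only
  refine congrArg (fun r : Int × List Char => String.mk r.2) ?_
  apply PySem.List.foldl_congr_mem
  intro st i hi
  rw [PySem.List.mem_pyRange_one] at hi
  obtain ⟨k, rfl⟩ : ∃ u : Nat, i = (u : Int) := ⟨i.toNat, by omega⟩
  have hk : k ≤ s.toList.length := by omega
  apply PySem.List.foldl_congr_mem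
  intro st' c _
  dsimp only
  have hsl1 : PySem.List.slice s.toList none (some (k : Int)) = s.toList.take k :=
    PySem.List.slice_to_natCast s.toList k
  have hsl2 : PySem.List.slice s.toList (some (k : Int)) none = s.toList.drop k :=
    PySem.List.slice_from_natCast s.toList k
  rw [hsl1, hsl2, pyTimeA_eq, cand s.toList k hk c, sumW]
  by_cases h0 : s.toList.length = 0
  · rw [if_pos h0, if_pos h0]
  · rw [if_neg h0, if_neg h0, if_pos h0]

-- ===== VERDICT (by name: the statement is the Claim_ definition above) =====
theorem max_typing_time_string_spec : Claim_equal_max_typing_time_string := by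
  intro s _
  unfold Spec_max_typing_time_string
  exact portA_eq_portB s
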